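-- pv_equiv track=rewrite | github.com/areebofficial45-creates/oslo-chess-trainer | build_puzzle_pools.py | get_display_theme
-- ===== SOURCE A (Python) =====
-- def get_display_theme(themes: list) -> str:
--     priority = ["mateIn1", "mateIn2", "mate", "sacrifice", "fork", "pin",
--                 "endgame", "middlegame", "opening", "promotion"]
--     for t in priority:
--         if t in themes:
--             return t
--     skip = {"crushing", "advantage", "short", "long", "veryLong",
--             "master", "masterVsMaster", "oneMove"}
--     for t in themes:
--         if t not in skip:
--             return t
--     return themes[0] if themes else "tactic"
-- ===== SOURCE B (Python) =====
-- def get_display_theme(themes: list) -> str: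
--     priority = ["mateIn1", "mateIn2", "mate", "sacrifice", "fork", "pin",
--                 "endgame", "middlegame", "opening", "promotion"]
--     rank = {t: i for i, t in enumerate(priority)}
--     candidates = [t for t in themes if t in rank]
--     if candidates:
--         return min(candidates, key=rank.get)
--     skip = {"crushing", "advantage", "short", "long", "veryLong",
--             "master", "masterVsMaster", "oneMove"}
--     return next((t for t in themes if t not in skip),
--                 themes[0] if themes else "tactic")
-- ===== Notes on version B (the rewrite author's own statement) =====
-- stated objective: alternative
-- what changed: Replaces the scan over the priority list with membership tests against the themes list by a rank table built once from the priority list: candidates present in the table are collected in one pass over themes and the one with the minimal rank is returned; the skip-based second pass and fallback are unchanged.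
import Mathlib
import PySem

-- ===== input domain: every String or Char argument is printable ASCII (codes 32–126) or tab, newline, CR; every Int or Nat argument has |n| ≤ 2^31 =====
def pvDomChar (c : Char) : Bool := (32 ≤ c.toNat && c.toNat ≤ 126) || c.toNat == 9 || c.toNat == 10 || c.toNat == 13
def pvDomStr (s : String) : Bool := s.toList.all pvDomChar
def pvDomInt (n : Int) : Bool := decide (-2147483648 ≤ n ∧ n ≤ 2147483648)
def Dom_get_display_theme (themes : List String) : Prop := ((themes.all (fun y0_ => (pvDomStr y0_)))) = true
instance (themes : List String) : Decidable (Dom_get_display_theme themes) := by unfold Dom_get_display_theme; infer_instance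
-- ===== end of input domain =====

-- B replaces A's scan of the priority list (a membership test against `themes` per
-- priority entry) by a rank table and a single candidate-collecting pass over `themes`
-- followed by a minimum-by-rank; second pass and fallback unchanged. Objective: alternative.

-- ===== PORT A =====
def pvPriority : List String :=
  ["mateIn1", "mateIn2", "mate", "sacrifice", "fork", "pin",
   "endgame", "middlegame", "opening", "promotion"]

def pvSkip : PySem.Set String :=
  PySem.Set.ofList ["crushing", "advantage", "short", "long", "veryLong",
                    "master", "masterVsMaster", "oneMove"]

-- first loop of A: 'for t in priority: if t in themes: return t'
def pvLoopA1 (ps : List String) (themes : List String) : Option String :=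
  match ps with
  | [] => none
  | t :: rest => if themes.contains t then some t else pvLoopA1 rest themes

-- second loop of A: 'for t in themes: if t not in skip: return t'
def pvLoopA2 (ts : List String) : Option String :=
  match ts with
  | [] => none
  | t :: rest => if !(PySem.Set.contains pvSkip t) then some t else pvLoopA2 rest

def get_display_theme (themes : List String) : String :=
  match pvLoopA1 pvPriority themes with
  | some t => t
  | none =>
    match pvLoopA2 themes with
    | some t => t
    | none => match themes with | [] => "tactic" | x :: _ => x

-- ===== PORT B =====
def pvRank : PySem.Dict String Int :=
  (PySem.List.enumerate pvPriority).foldl (fun d p => d.insert p.2 p.1) PySem.Dict.empty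

def get_display_theme_alt (themes : List String) : String :=
  let candidates := themes.filter (fun t => (pvRank.get? t).isSome)
  if candidates = [] then
    -- next((t for t in themes if t not in skip), themes[0] if themes else "tactic")
    (themes.find? (fun t => !(PySem.Set.contains pvSkip t))).getD
      (match themes with | [] => "tactic" | x :: _ => x)
  else
    match PySem.List.min? candidates (fun t => pvRank.getD t 0) with
    | some m => m
    | none => "tactic"   -- unreachable: candidates ≠ []

-- ===== PRECONDITION & SPEC =====
def Spec_get_display_theme (themes : List String) (out : String) : Prop := out = get_display_theme_alt themes
instance (themes : List String) (out : String) : Decidable (Spec_get_display_theme themes out) := by unfold Spec_get_display_theme; infer_instance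

-- ===== CLAIM (what is proved, stated in full; the proofs are below) =====
def Claim_equal_get_display_theme : Prop := ∀ (themes : List String), Dom_get_display_theme themes → Spec_get_display_theme themes (get_display_theme themes)

-- ===== LEMMAS AND PROOFS =====

def pvKey (t : String) : Int := pvRank.getD t 0

theorem pv_mem_isSome : ∀ t ∈ pvPriority, (pvRank.get? t).isSome = true := by decide

theorem pv_isSome_mem (t : String) (h : (pvRank.get? t).isSome = true) : t ∈ pvPriority := by
  by_contra hmem
  have h1 : t ≠ "mateIn1" := by rintro rfl; exact hmem (by decide)
  have h2 : t ≠ "mateIn2" := by rintro rfl; exact hmem (by decide)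
  have h3 : t ≠ "mate" := by rintro rfl; exact hmem (by decide)
  have h4 : t ≠ "sacrifice" := by rintro rfl; exact hmem (by decide)
  have h5 : t ≠ "fork" := by rintro rfl; exact hmem (by decide)
  have h6 : t ≠ "pin" := by rintro rfl; exact hmem (by decide)
  have h7 : t ≠ "endgame" := by rintro rfl; exact hmem (by decide)
  have h8 : t ≠ "middlegame" := by rintro rfl; exact hmem (by decide)
  have h9 : t ≠ "opening" := by rintro rfl; exact hmem (by decide)
  have h10 : t ≠ "promotion" := by rintro rfl; exact hmem (by decide)
  simp [pvRank, pvPriority, PySem.List.enumerate, PySem.Dict.get?_insert,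
        h1, h2, h3, h4, h5, h6, h7, h8, h9, h10, PySem.Dict.get?_empty] at h

theorem pv_key_inj : ∀ a ∈ pvPriority, ∀ b ∈ pvPriority, pvKey a = pvKey b → a = b := by decide

-- B returns the candidate of minimal rank; under A's "found at p" facts that is p.
theorem pv_minCase (themes : List String) (p : String) (hp : p ∈ pvPriority)
    (hc : p ∈ themes) (he : ∀ q ∈ pvPriority, pvKey q < pvKey p → q ∉ themes) :
    PySem.List.min? (themes.filter (fun t => (pvRank.get? t).isSome))
      (fun t => pvRank.getD t 0) = some p := by
  show PySem.List.min? (themes.filter (fun t => (pvRank.get? t).isSome)) pvKey = some p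
  have hpc : p ∈ themes.filter (fun t => (pvRank.get? t).isSome) := by
    simp [List.mem_filter, hc, pv_mem_isSome p hp]
  obtain ⟨m, hm⟩ : ∃ m, PySem.List.min? (themes.filter (fun t => (pvRank.get? t).isSome)) pvKey = some m := by
    cases h : PySem.List.min? (themes.filter (fun t => (pvRank.get? t).isSome)) pvKey with
    | none =>
        rw [PySem.List.min?_eq_none_iff] at h
        rw [h] at hpc; cases hpc
    | some m => exact ⟨m, rfl⟩
  have hmmem := PySem.List.min?_mem hm
  have hmth : m ∈ themes := (List.mem_filter.mp hmmem).1
  have hmpr : m ∈ pvPriority := pv_isSome_mem m (by simpa using (List.mem_filter.mp hmmem).2)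
  have hle : pvKey m ≤ pvKey p := PySem.List.min?_isMin hm p hpc
  have hnlt : ¬ pvKey m < pvKey p := fun hlt => he m hmpr hlt hmth
  have heq : pvKey m = pvKey p := le_antisymm hle (not_lt.mp hnlt)
  rw [hm, pv_key_inj m hmpr p hp heq]

theorem pv_altCase (themes : List String) (p : String) (hp : p ∈ pvPriority)
    (hc : p ∈ themes) (he : ∀ q ∈ pvPriority, pvKey q < pvKey p → q ∉ themes) :
    get_display_theme_alt themes = p := by
  have hmin := pv_minCase themes p hp hc he
  have hne : themes.filter (fun t => (pvRank.get? t).isSome) ≠ [] := by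
    intro h; rw [h] at hmin; simp [PySem.List.min?] at hmin
  unfold get_display_theme_alt
  simp only [if_neg hne, hmin]

theorem pvLoopA2_eq_find? (ts : List String) :
    pvLoopA2 ts = ts.find? (fun t => !(PySem.Set.contains pvSkip t)) := by
  induction ts with
  | nil => rfl
  | cons t rest ih =>
      unfold pvLoopA2
      rw [List.find?_cons]
      by_cases h : t ∈ pvSkip <;> simp [h, ih]

theorem pv_main (themes : List String) :
    get_display_theme themes = get_display_theme_alt themes := by
  by_cases h1 : "mateIn1" ∈ themes
  · rw [pv_altCase themes "mateIn1" (by decide) h1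
      (by intro q hq hlt; fin_cases hq <;> exact absurd hlt (by decide))]
    simp [get_display_theme, pvLoopA1, pvPriority, h1]
  by_cases h2 : "mateIn2" ∈ themes
  · rw [pv_altCase themes "mateIn2" (by decide) h2
      (by intro q hq hlt; fin_cases hq <;> first | exact absurd hlt (by decide) | assumption)]
    simp [get_display_theme, pvLoopA1, pvPriority, h1, h2]
  by_cases h3 : "mate" ∈ themes
  · rw [pv_altCase themes "mate" (by decide) h3
      (by intro q hq hlt; fin_cases hq <;> first | exact absurd hlt (by decide) | assumption)]
    simp [get_display_theme, pvLoopA1, pvPriority, h1, h2, h3]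
  by_cases h4 : "sacrifice" ∈ themes
  · rw [pv_altCase themes "sacrifice" (by decide) h4
      (by intro q hq hlt; fin_cases hq <;> first | exact absurd hlt (by decide) | assumption)]
    simp [get_display_theme, pvLoopA1, pvPriority, h1, h2, h3, h4]
  by_cases h5 : "fork" ∈ themes
  · rw [pv_altCase themes "fork" (by decide) h5
      (by intro q hq hlt; fin_cases hq <;> first | exact absurd hlt (by decide) | assumption)]
    simp [get_display_theme, pvLoopA1, pvPriority, h1, h2, h3, h4, h5]
  by_cases h6 : "pin" ∈ themes
  · rw [pv_altCase themes "pin" (by decide) h6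
      (by intro q hq hlt; fin_cases hq <;> first | exact absurd hlt (by decide) | assumption)]
    simp [get_display_theme, pvLoopA1, pvPriority, h1, h2, h3, h4, h5, h6]
  by_cases h7 : "endgame" ∈ themes
  · rw [pv_altCase themes "endgame" (by decide) h7
      (by intro q hq hlt; fin_cases hq <;> first | exact absurd hlt (by decide) | assumption)]
    simp [get_display_theme, pvLoopA1, pvPriority, h1, h2, h3, h4, h5, h6, h7]
  by_cases h8 : "middlegame" ∈ themes
  · rw [pv_altCase themes "middlegame" (by decide) h8
      (by intro q hq hlt; fin_cases hq <;> first | exact absurd hlt (by decide) | assumption)]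
    simp [get_display_theme, pvLoopA1, pvPriority, h1, h2, h3, h4, h5, h6, h7, h8]
  by_cases h9 : "opening" ∈ themes
  · rw [pv_altCase themes "opening" (by decide) h9
      (by intro q hq hlt; fin_cases hq <;> first | exact absurd hlt (by decide) | assumption)]
    simp [get_display_theme, pvLoopA1, pvPriority, h1, h2, h3, h4, h5, h6, h7, h8, h9]
  by_cases h10 : "promotion" ∈ themes
  · rw [pv_altCase themes "promotion" (by decide) h10
      (by intro q hq hlt; fin_cases hq <;> first | exact absurd hlt (by decide) | assumption)]
    simp [get_display_theme, pvLoopA1, pvPriority, h1, h2, h3, h4, h5, h6, h7, h8, h9, h10]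
  -- no priority theme present: A's first loop falls through, B's candidates are empty
  have hfil : themes.filter (fun t => (pvRank.get? t).isSome) = [] := by
    rw [List.filter_eq_nil_iff]
    intro t ht hsome
    have := pv_isSome_mem t (by simpa using hsome)
    fin_cases this <;> simp_all
  unfold get_display_theme get_display_theme_alt
  simp only [hfil, if_pos]
  rw [pvLoopA2_eq_find?]
  cases hf : themes.find? (fun t => !(PySem.Set.contains pvSkip t)) <;>
    simp [pvLoopA1, pvPriority, h1, h2, h3, h4, h5, h6, h7, h8, h9, h10]

-- ===== VERDICT (by name: the statement is the Claim_ definition above) =====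
theorem get_display_theme_spec : Claim_equal_get_display_theme := by
  intro themes _
  unfold Spec_get_display_theme
  exact pv_main themes
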